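-- pv_equiv track=rewrite | github.com/Frederick-S/Introduction-to-Algorithms-Notes | src/chapter_08/sorting_variable_length_strings.py | sorting_variable_length_strings_internal
-- ===== SOURCE A (Python) =====
-- k = 255
--
-- def sorting_variable_length_strings_internal(strings, string_start_index):
--     length = len(strings)
--
--     if length == 0:
--         return strings
--
--     if string_start_index >= max(map(len, strings)):
--         return strings
--
--     strings_by_start_letter = [[] for i in range(k + 1)]
--
--     strings = counting_sort(strings, string_start_index)
--
--     for i in range(length):
--         strings_by_start_letter[get_digit(
--             strings[i], string_start_index)].append(strings[i])
--
--     for i in range(k + 1):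
--         strings_by_start_letter[i] = sorting_variable_length_strings_internal(
--             strings_by_start_letter[i], string_start_index + 1)
--
--     result = []
--
--     for i in range(k + 1):
--         result += strings_by_start_letter[i]
--
--     return result
--
-- def counting_sort(strings, index):
--     length = len(strings)
--
--     if length == 0:
--         return strings
--
--     c = [0] * (k + 1)
--     b = [''] * length
--
--     for i in range(length):
--         c[get_digit(strings[i], index)] += 1
--
--     for i in range(1, k + 1):
--         c[i] += c[i - 1]
--
--     for i in range(length - 1, -1, -1):
--         b[c[get_digit(strings[i], index)] - 1] = strings[i]
--         c[get_digit(strings[i], index)] -= 1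
--
--     return b
--
-- def get_digit(string, i):
--     if i >= len(string):
--         return 0
--
--     return ord(string[i])
-- ===== SOURCE B (Python) =====
-- def sorting_variable_length_strings_internal(strings, string_start_index):
--     if not strings:
--         return strings
--     max_length = max(map(len, strings))
--     return sorted(strings,
--                   key=lambda s: [get_digit(s, i)
--                                  for i in range(string_start_index, max_length)])
--
-- def get_digit(string, i):
--     if i >= len(string):
--         return 0
--
--     return ord(string[i])
-- ===== Notes on version B (the rewrite author's own statement) =====
-- stated objective: idiomatic
-- what changed: Replaces the hand-written recursive MSD radix sort (a counting sort plus 256 bucket lists per recursion level) by a single call to Python's built-in stable sort keyed by each string's zero-padded digit sequence from string_start_index up to the maximum string length.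
import Mathlib
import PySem

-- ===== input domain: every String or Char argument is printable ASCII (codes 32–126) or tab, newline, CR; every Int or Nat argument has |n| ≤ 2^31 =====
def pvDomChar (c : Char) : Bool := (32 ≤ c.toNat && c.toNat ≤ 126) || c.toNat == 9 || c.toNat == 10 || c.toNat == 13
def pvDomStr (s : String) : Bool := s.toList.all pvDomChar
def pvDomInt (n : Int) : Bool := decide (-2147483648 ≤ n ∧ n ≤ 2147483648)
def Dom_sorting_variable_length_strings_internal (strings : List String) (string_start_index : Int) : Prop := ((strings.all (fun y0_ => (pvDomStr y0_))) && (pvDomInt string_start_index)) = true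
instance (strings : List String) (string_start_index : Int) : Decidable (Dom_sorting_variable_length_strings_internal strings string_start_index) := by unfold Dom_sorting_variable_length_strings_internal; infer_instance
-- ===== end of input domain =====

-- B replaces the hand-written recursive MSD radix sort by one call to Python's built-in stable
-- sort with the padded digit-sequence key (idiomatic; same return value).


-- ===== PORT A =====

-- get_digit(string, i)  (module-level helper, shared verbatim by Source A and Source B)
def pyGetDigit (s : String) (i : Int) : Int :=
  if i ≥ PySem.Str.len s then 0
  else
    match PySem.Str.pyGet? s i with
    | some c => (c.toNat : Int)
    | none => 0       -- Python raises IndexError here (i < -len(s)); such inputs are outside Pre_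

-- max(map(len, strings))  (the same expression occurs in Source A and Source B; used on non-empty lists)
def maxLenI (strings : List String) : Int :=
  ((PySem.List.max? (strings.map (fun s => PySem.Str.len s)) (fun x => x)).getD 0)

-- counting_sort(strings, index)
def countingSort (strings : List String) (index : Int) : List String :=
  let length : Int := PySem.List.len strings
  if length = 0 then strings
  else
    let c0 : List Int := List.replicate 256 0
    let b0 : List String := List.replicate strings.length ""
    let c1 := (PySem.List.pyRange 0 length).foldl
      (fun c i =>
        let d := pyGetDigit (PySem.List.pyGetD strings i "") index
        c.set d.toNat (PySem.List.pyGetD c d 0 + 1)) c0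
    let c2 := (PySem.List.pyRange 1 256).foldl
      (fun c i => c.set i.toNat (PySem.List.pyGetD c i 0 + PySem.List.pyGetD c (i - 1) 0)) c1
    let bc := (PySem.List.pyRange (length - 1) (-1) (-1)).foldl
      (fun (bc : List String × List Int) i =>
        let s := PySem.List.pyGetD strings i ""
        let d := pyGetDigit s index
        (bc.1.set (PySem.List.pyGetD bc.2 d 0 - 1).toNat s,
         bc.2.set d.toNat (PySem.List.pyGetD bc.2 d 0 - 1))) (b0, c2)
    bc.1

-- the 'strings_by_start_letter' filling loop of A
def bucketize (strings2 : List String) (index : Int) : List (List String) :=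
  (PySem.List.pyRange 0 (PySem.List.len strings2)).foldl
    (fun bs i =>
      let s := PySem.List.pyGetD strings2 i ""
      let d := pyGetDigit s index
      bs.set d.toNat (PySem.List.pyGetD bs d [] ++ [s]))
    (List.replicate 256 [])

lemma pvFoldlInv {σ β : Type} (f : σ → β → σ) (P : σ → Prop)
    (h : ∀ st b, P st → P (f st b)) : ∀ (r : List β) (st : σ), P st → P (r.foldl f st) := by
  intro r
  induction r with
  | nil => intro st hst; exact hst
  | cons b r ih => intro st hst; exact ih _ (h st b hst)

lemma pvMem_pyGetD {α : Type} (l : List α) (i : Int) (d : α) :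
    PySem.List.pyGetD l i d = d ∨ PySem.List.pyGetD l i d ∈ l := by
  unfold PySem.List.pyGetD
  cases h : PySem.List.pyGet? l i with
  | none => left; rfl
  | some a => right; simpa using PySem.List.mem_of_pyGet?_eq_some l h

lemma mem_of_mem_countingSort {t : String} {l : List String} {i : Int}
    (h : t ∈ countingSort l i) : t = "" ∨ t ∈ l := by
  simp only [countingSort] at h
  split at h
  · exact Or.inr h
  · refine pvFoldlInv _ (fun st : List String × List Int => ∀ u ∈ st.1, u = "" ∨ u ∈ l)
      ?_ _ _ ?_ t h
    · intro st b hst u hu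
      simp only at hu
      rcases List.mem_or_eq_of_mem_set hu with hu | rfl
      · exact hst u hu
      · rcases pvMem_pyGetD l b "" with h' | h'
        · exact Or.inl h'
        · exact Or.inr h'
    · intro u hu
      exact Or.inl (List.eq_of_mem_replicate hu)

lemma mem_of_mem_bucketize {bl : List String} {l : List String} {i : Int}
    (h : bl ∈ bucketize l i) : ∀ t ∈ bl, t = "" ∨ t ∈ l := by
  simp only [bucketize] at h
  refine pvFoldlInv _ (fun bs : List (List String) => ∀ b ∈ bs, ∀ t ∈ b, t = "" ∨ t ∈ l)
    ?_ _ _ ?_ bl h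
  · intro bs j hst b hb t ht
    simp only at hb
    rcases List.mem_or_eq_of_mem_set hb with hb | rfl
    · exact hst b hb t ht
    · rcases List.mem_append.1 ht with ht | ht
      · rcases pvMem_pyGetD bs (pyGetDigit (PySem.List.pyGetD l j "") i) [] with h' | h'
        · rw [h'] at ht; simp at ht
        · exact hst _ h' t ht
      · simp only [List.mem_singleton] at ht
        subst ht
        rcases pvMem_pyGetD l j "" with h' | h'
        · exact Or.inl h'
        · exact Or.inr h'
  · intro b hb t ht
    rw [List.eq_of_mem_replicate hb] at ht
    simp at ht

-- maxLenI bounds (used by the termination argument of the port of A)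
lemma maxLenI_nonneg (l : List String) : 0 ≤ maxLenI l := by
  unfold maxLenI
  cases h : PySem.List.max? (l.map (fun s => PySem.Str.len s)) (fun x => x) with
  | none => simp
  | some m =>
    have hm := PySem.List.max?_mem h
    simp only [List.mem_map] at hm
    obtain ⟨s, _, rfl⟩ := hm
    simp only [Option.getD_some, PySem.Str.len]
    exact Int.natCast_nonneg _

lemma len_le_maxLenI {t : String} {l : List String} (h : t ∈ l) :
    PySem.Str.len t ≤ maxLenI l := by
  unfold maxLenI
  cases hm : PySem.List.max? (l.map (fun s => PySem.Str.len s)) (fun x => x) with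
  | none =>
    rw [PySem.List.max?_eq_none_iff] at hm
    simp only [List.map_eq_nil_iff] at hm
    subst hm
    simp at h
  | some m =>
    have := PySem.List.max?_isMax hm (PySem.Str.len t) (List.mem_map_of_mem h)
    simpa using this

lemma maxLenI_le {l : List String} {M : Int} (h : ∀ t ∈ l, PySem.Str.len t ≤ M)
    (h0 : 0 ≤ M) : maxLenI l ≤ M := by
  unfold maxLenI
  cases hm : PySem.List.max? (l.map (fun s => PySem.Str.len s)) (fun x => x) with
  | none => simpa using h0
  | some m =>
    have := PySem.List.max?_mem hm
    simp only [List.mem_map] at this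
    obtain ⟨s, hs, rfl⟩ := this
    simpa using h s hs

-- sorting_variable_length_strings_internal(strings, string_start_index)
def sorting_variable_length_strings_internal (strings : List String) (string_start_index : Int) : List String :=
  let length : Int := PySem.List.len strings
  if length = 0 then strings
  else if string_start_index ≥ maxLenI strings then strings
  else
    let strings2 := countingSort strings string_start_index
    let buckets := bucketize strings2 string_start_index
    let buckets2 := buckets.attach.map
      (fun bl => sorting_variable_length_strings_internal bl.1 (string_start_index + 1))
    (PySem.List.pyRange 0 256).foldl (fun acc i => acc ++ PySem.List.pyGetD buckets2 i []) []
termination_by (maxLenI strings - string_start_index).toNat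
decreasing_by
  rename_i h0 h1
  have hnn := maxLenI_nonneg strings
  have hz : PySem.Str.len "" = 0 := by decide
  have hmem := mem_of_mem_bucketize bl.2
  have hlen : maxLenI bl.1 ≤ maxLenI strings := by
    apply maxLenI_le _ hnn
    intro t ht
    rcases hmem t ht with h | h
    · subst h; omega
    · rcases mem_of_mem_countingSort h with h' | h'
      · subst h'; omega
      · exact len_le_maxLenI h'
  have h1' : string_start_index < maxLenI strings := by omega
  omega

-- ===== PORT B =====
def sorting_variable_length_strings_internal_alt (strings : List String) (string_start_index : Int) : List String :=
  if strings = [] then strings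
  else
    let max_length := maxLenI strings
    PySem.List.sorted strings
      (fun s => (PySem.List.pyRange string_start_index max_length).map (fun i => pyGetDigit s i))

-- ===== PRECONDITION & SPEC =====
-- Pre_ excludes exactly the inputs on which the Python A raises IndexError: a negative start
-- index together with some string shorter than |start| makes get_digit evaluate string[i] with
-- i < -len(string).
def Pre_sorting_variable_length_strings_internal (strings : List String) (string_start_index : Int) : Prop :=
  strings = [] ∨ 0 ≤ string_start_index ∨ ∀ s ∈ strings, -string_start_index ≤ PySem.Str.len s
instance (strings : List String) (string_start_index : Int) : Decidable (Pre_sorting_variable_length_strings_internal strings string_start_index) := by unfold Pre_sorting_variable_length_strings_internal; infer_instance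

def pvWitness_sorting_variable_length_strings_internal : List String × Int := (["ba", "ab", "aa", "b"], 0)

def Spec_sorting_variable_length_strings_internal (strings : List String) (string_start_index : Int) (out : List String) : Prop := out = sorting_variable_length_strings_internal_alt strings string_start_index
instance (strings : List String) (string_start_index : Int) (out : List String) : Decidable (Spec_sorting_variable_length_strings_internal strings string_start_index out) := by unfold Spec_sorting_variable_length_strings_internal; infer_instance

-- ===== CLAIM (what is proved, stated in full; the proofs are below) =====
def Claim_equal_sorting_variable_length_strings_internal : Prop := ∀ (strings : List String) (string_start_index : Int), Dom_sorting_variable_length_strings_internal strings string_start_index → Pre_sorting_variable_length_strings_internal strings string_start_index → Spec_sorting_variable_length_strings_internal strings string_start_index (sorting_variable_length_strings_internal strings string_start_index)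

-- ===== LEMMAS AND PROOFS =====

-- the key function used (inlined) by the port of B
def keyK (i L : Int) (s : String) : List Int :=
  (PySem.List.pyRange i L).map (fun p => pyGetDigit s p)

lemma alt_eq_sorted (l : List String) (i : Int) (h : ¬ l = []) :
    sorting_variable_length_strings_internal_alt l i
      = PySem.List.sorted l (fun s => keyK i (maxLenI l) s) := by
  simp only [sorting_variable_length_strings_internal_alt, if_neg h]
  rfl

-- ---------- lexicographic comparison of Int lists ----------
lemma pvLex_append_iff (u v w : List Int) (h : u.length = v.length) :
    u ++ w < v ++ w ↔ u < v := by
  induction u generalizing v with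
  | nil =>
    cases v with
    | nil => exact iff_of_false (lt_irrefl w) (List.not_lt_nil [])
    | cons y v => simp at h
  | cons x u ih =>
    cases v with
    | nil => simp at h
    | cons y v =>
      rw [List.cons_append, List.cons_append, List.cons_lt_cons_iff, List.cons_lt_cons_iff,
        ih v (by simpa using h)]

lemma pvLex_cons_iff_of_eq {x y : Int} {u v : List Int} (h : x = y) :
    (x :: u) < (y :: v) ↔ u < v := by
  subst h
  rw [List.cons_lt_cons_iff]
  simp [lt_irrefl]

-- ---------- insertBy ----------
lemma insertBy_nil {α : Type} (before : α → α → Bool) (x : α) :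
    PySem.List.insertBy before x [] = [x] := rfl

lemma insertBy_cons {α : Type} (before : α → α → Bool) (x y : α) (ys : List α) :
    PySem.List.insertBy before x (y :: ys)
      = if before x y then x :: y :: ys else y :: PySem.List.insertBy before x ys := rfl

lemma insertBy_append_left {α : Type} (before : α → α → Bool) (x : α) (as bs : List α)
    (h : ∀ a ∈ as, before x a = false) :
    PySem.List.insertBy before x (as ++ bs) = as ++ PySem.List.insertBy before x bs := by
  induction as with
  | nil => rfl
  | cons a as ih =>
    rw [List.cons_append, insertBy_cons, if_neg (by simp [h a (by simp)]), List.cons_append,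
      ih (fun a ha => h a (by simp [ha]))]

lemma insertBy_append_right {α : Type} (before : α → α → Bool) (x : α) (as bs : List α)
    (h : ∀ b ∈ bs, before x b = true) :
    PySem.List.insertBy before x (as ++ bs) = PySem.List.insertBy before x as ++ bs := by
  induction as with
  | nil =>
    cases bs with
    | nil => rfl
    | cons b bs => simp [insertBy_cons, insertBy_nil, h b (by simp)]
  | cons a as ih =>
    rw [List.cons_append, insertBy_cons, insertBy_cons]
    by_cases hxa : before x a
    · simp [hxa]
    · simp [hxa, ih]

lemma insertBy_congr {α : Type} (b1 b2 : α → α → Bool) (x : α) (ys : List α)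
    (h : ∀ y ∈ ys, b1 x y = b2 x y) :
    PySem.List.insertBy b1 x ys = PySem.List.insertBy b2 x ys := by
  induction ys with
  | nil => rfl
  | cons y ys ih =>
    rw [insertBy_cons, insertBy_cons, h y (by simp), ih (fun z hz => h z (by simp [hz]))]

lemma filter_insertBy_of_neg {α : Type} (p : α → Bool) (before : α → α → Bool) (x : α)
    (ys : List α) (hx : p x = false) :
    (PySem.List.insertBy before x ys).filter p = ys.filter p := by
  induction ys with
  | nil => simp [insertBy_nil, hx]
  | cons y ys ih =>
    rw [insertBy_cons]
    by_cases h : before x y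
    · simp [h, List.filter_cons, hx]
    · simp only [if_neg h, List.filter_cons]
      cases hpy : p y <;> simp [ih]

lemma filter_insertBy_of_pos {α : Type} (k : α → Int) (x : α) (ys : List α)
    (hp : ys.Pairwise (fun a b => k a ≤ k b)) :
    (PySem.List.insertBy (fun a b => decide (k a < k b)) x ys).filter (fun y => decide (k y = k x))
      = ys.filter (fun y => decide (k y = k x)) ++ [x] := by
  induction ys with
  | nil => simp [insertBy_nil]
  | cons y ys ih =>
    rw [insertBy_cons]
    by_cases h : k x < k y
    · have h1 : List.filter (fun y => decide (k y = k x)) (y :: ys) = [] := by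
        rw [List.filter_eq_nil_iff]
        intro z hz
        rcases List.mem_cons.1 hz with rfl | hz
        · simp; omega
        · have := (List.pairwise_cons.1 hp).1 z hz
          simp; omega
      rw [h1]
      simp [h, List.filter_cons, h1]
    · rw [if_neg (show ¬ (decide (k x < k y) = true) by simp [h]), List.filter_cons]
      cases hpy : decide (k y = k x) <;>
        simp [hpy, ih (List.pairwise_cons.1 hp).2]

lemma insertBy_sorted_eq_insertIdx {α : Type} (k : α → Int) (x : α) (ys : List α)
    (hp : ys.Pairwise (fun a b => k a ≤ k b)) :
    PySem.List.insertBy (fun a b => decide (k a < k b)) x ys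
      = ys.insertIdx (ys.countP (fun y => decide (k y ≤ k x))) x := by
  induction ys with
  | nil => rfl
  | cons y ys ih =>
    rw [insertBy_cons]
    by_cases h : k x < k y
    · have hcnt : (y :: ys).countP (fun y => decide (k y ≤ k x)) = 0 := by
        rw [List.countP_eq_zero]
        intro z hz
        rcases List.mem_cons.1 hz with rfl | hz
        · simp; omega
        · have := (List.pairwise_cons.1 hp).1 z hz
          simp; omega
      rw [hcnt]
      simp [h]
    · have hyx : k y ≤ k x := by omega
      rw [if_neg (by simpa using h), ih (List.pairwise_cons.1 hp).2, List.countP_cons]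
      simp [hyx, List.insertIdx_succ_cons]

-- ---------- sorted ----------
lemma sorted_append_one {α κ : Type} [LT κ] [DecidableLT κ] (l : List α) (x : α) (k : α → κ) :
    PySem.List.sorted (l ++ [x]) k
      = PySem.List.insertBy (fun a b => decide (k a < k b)) x (PySem.List.sorted l k) := by
  rw [PySem.List.sorted_eq_foldl_insertBy, PySem.List.sorted_eq_foldl_insertBy, List.foldl_append]
  rfl

lemma sorted_key_congr {α κ : Type} [LT κ] [DecidableLT κ] (l : List α) (k1 k2 : α → κ)
    (h : ∀ a ∈ l, ∀ b ∈ l, decide (k1 a < k1 b) = decide (k2 a < k2 b)) :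
    PySem.List.sorted l k1 = PySem.List.sorted l k2 := by
  induction l using List.reverseRecOn with
  | nil => rfl
  | append_singleton l x ih =>
    rw [sorted_append_one, sorted_append_one,
      ih (fun a ha b hb => h a (by simp [ha]) b (by simp [hb]))]
    apply insertBy_congr
    intro y hy
    have hyl : y ∈ l := (PySem.List.mem_sorted _ _ _ _).1 hy
    exact h x (by simp) y (by simp [hyl])

lemma sorted_of_forall_not_lt {α κ : Type} [LT κ] [DecidableLT κ] (l : List α) (k : α → κ)
    (h : ∀ a ∈ l, ∀ b ∈ l, decide (k a < k b) = false) :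
    PySem.List.sorted l k = l := by
  induction l using List.reverseRecOn with
  | nil => rfl
  | append_singleton l x ih =>
    rw [sorted_append_one, ih (fun a ha b hb => h a (by simp [ha]) b (by simp [hb])),
      PySem.List.insertBy_of_forall_not_before]
    intro y hy
    exact h x (by simp) y (by simp [hy])

lemma filter_sorted_class (l : List String) (k : String → Int) (e : Int) :
    (PySem.List.sorted l k).filter (fun s => decide (k s = e))
      = l.filter (fun s => decide (k s = e)) := by
  induction l using List.reverseRecOn with
  | nil => rfl
  | append_singleton l x ih =>
    rw [sorted_append_one, List.filter_append]
    by_cases hx : k x = e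
    · subst hx
      rw [filter_insertBy_of_pos k x _ (PySem.List.sorted_pairwise _ _), ih]
      simp
    · rw [filter_insertBy_of_neg _ _ _ _ (by simp [hx]), ih]
      simp [hx]


-- ---------- digit and key facts ----------
lemma pvDigit_nonneg (s : String) (i : Int) : 0 ≤ pyGetDigit s i := by
  unfold pyGetDigit
  split
  · exact le_refl 0
  · cases h : PySem.Str.pyGet? s i with
    | none => simp
    | some c => simp

lemma pvDigit_le_255 {s : String} (hs : pvDomStr s = true) (i : Int) : pyGetDigit s i ≤ 255 := by
  unfold pyGetDigit
  split
  · omega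
  · cases h : PySem.Str.pyGet? s i with
    | none => simp
    | some c =>
      simp only []
      have hc : c ∈ s.toList := by
        have : PySem.List.pyGet? s.toList i = some c := h
        exact PySem.List.mem_of_pyGet?_eq_some _ this
      have := (List.all_eq_true.1 hs) c hc
      unfold pvDomChar at this
      simp only [Bool.or_eq_true, Bool.and_eq_true, decide_eq_true_eq, beq_iff_eq] at this
      omega

lemma pvDigit_of_len_le {s : String} {p : Int} (h : PySem.Str.len s ≤ p) : pyGetDigit s p = 0 := by
  unfold pyGetDigit
  rw [if_pos h]

lemma pvPyRange_one_nil {a b : Int} (h : b ≤ a) : PySem.List.pyRange a b = [] := by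
  unfold PySem.List.pyRange
  have h1 : ¬ a < b := not_lt.2 h
  norm_num [h1]

lemma keyK_cons {i L : Int} (h : i < L) (s : String) :
    keyK i L s = pyGetDigit s i :: keyK (i + 1) L s := by
  unfold keyK
  rw [PySem.List.pyRange_one_cons h, List.map_cons]

lemma keyK_nil {i L : Int} (h : L ≤ i) (s : String) : keyK i L s = [] := by
  unfold keyK
  rw [pvPyRange_one_nil h, List.map_nil]

lemma keyK_lt_iff_of_le {a b : String} {i m p : Int}
    (hma : PySem.Str.len a ≤ m) (hmb : PySem.Str.len b ≤ m) (hmp : m ≤ p) :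
    (keyK i p a < keyK i p b ↔ keyK i m a < keyK i m b) := by
  by_cases hip : p ≤ i
  · rw [keyK_nil hip, keyK_nil hip, keyK_nil (le_trans hmp hip), keyK_nil (le_trans hmp hip)]
  · push_neg at hip
    by_cases him : m ≤ i
    · have hz : ∀ (s : String), PySem.Str.len s ≤ m →
          keyK i p s = (PySem.List.pyRange i p).map (fun _ => (0 : Int)) := by
        intro s hs
        unfold keyK
        apply List.map_congr_left
        intro q hq
        have := (PySem.List.mem_pyRange_one).1 hq
        exact pvDigit_of_len_le (by omega)
      rw [keyK_nil him, keyK_nil him, hz a hma, hz b hmb]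
      exact iff_of_false (lt_irrefl _) (List.not_lt_nil [])
    · push_neg at him
      have hpad : ∀ (s : String), PySem.Str.len s ≤ m →
          keyK i p s = keyK i m s ++ (PySem.List.pyRange m p).map (fun _ => (0 : Int)) := by
        intro s hs
        unfold keyK
        rw [PySem.List.pyRange_one_append i m p (by omega) hmp, List.map_append]
        congr 1
        apply List.map_congr_left
        intro q hq
        have := (PySem.List.mem_pyRange_one).1 hq
        exact pvDigit_of_len_le (by omega)
      rw [hpad a hma, hpad b hmb]
      exact pvLex_append_iff _ _ _ (by simp [keyK])

-- ---------- splitting a stable sort along the leading digit ----------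
lemma insertBy_flatten (E : List Nat) (S : Nat → List String) (before : String → String → Bool)
    (x : String) (d : Nat) (hE : E.Pairwise (· < ·)) (hd : d ∈ E)
    (hlt : ∀ e ∈ E, e < d → ∀ y ∈ S e, before x y = false)
    (hgt : ∀ e ∈ E, d < e → ∀ y ∈ S e, before x y = true) :
    PySem.List.insertBy before x (E.map S).flatten
      = (E.map (fun e => if e = d then PySem.List.insertBy before x (S e) else S e)).flatten := by
  induction E with
  | nil => simp at hd
  | cons e E ih =>
    simp only [List.map_cons, List.flatten_cons]
    rcases List.mem_cons.1 hd with rfl | hd'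
    · rw [insertBy_append_right _ _ _ _ ?hb, if_pos rfl]
      case hb =>
        intro b hb
        rw [List.mem_flatten] at hb
        obtain ⟨bl, hbl, hbmem⟩ := hb
        rw [List.mem_map] at hbl
        obtain ⟨e', he', rfl⟩ := hbl
        exact hgt e' (by simp [he']) ((List.pairwise_cons.1 hE).1 e' he') b hbmem
      congr 1
      congr 1
      apply List.map_congr_left
      intro e' he'
      rw [if_neg (by have := (List.pairwise_cons.1 hE).1 e' he'; omega)]
    · have hed : e < d := (List.pairwise_cons.1 hE).1 d hd'
      rw [insertBy_append_left _ _ _ _ (fun a ha => hlt e (by simp) hed a ha), if_neg (by omega)]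
      congr 1
      exact ih (List.pairwise_cons.1 hE).2 hd'
        (fun e' he' hlt' y hy => hlt e' (by simp [he']) hlt' y hy)
        (fun e' he' hgt' y hy => hgt e' (by simp [he']) hgt' y hy)

set_option maxRecDepth 16384 in
lemma sorted_split (l : List String) (g : String → Int) (r : String → List Int)
    (hg : ∀ s ∈ l, 0 ≤ g s ∧ g s ≤ 255) :
    ((List.range 256).map
        (fun (e : Nat) => PySem.List.sorted (l.filter (fun s => decide (g s = (e : Int)))) r)).flatten
      = PySem.List.sorted l (fun s => g s :: r s) := by
  induction l using List.reverseRecOn with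
  | nil => rfl
  | append_singleton l x ih =>
    have hgx := hg x (by simp)
    have hgl : ∀ s ∈ l, 0 ≤ g s ∧ g s ≤ 255 := fun s hs => hg s (by simp [hs])
    have hdx : ((g x).toNat : Int) = g x := Int.toNat_of_nonneg hgx.1
    have hmap : (List.range 256).map
          (fun (e : Nat) => PySem.List.sorted ((l ++ [x]).filter (fun s => decide (g s = (e : Int)))) r)
        = (List.range 256).map
          (fun (e : Nat) => if e = (g x).toNat then
              PySem.List.insertBy (fun a b => decide ((g a :: r a) < (g b :: r b))) x
                (PySem.List.sorted (l.filter (fun s => decide (g s = (e : Int)))) r)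
            else PySem.List.sorted (l.filter (fun s => decide (g s = (e : Int)))) r) := by
      apply List.map_congr_left
      intro e he
      rw [List.filter_append]
      by_cases hde : e = (g x).toNat
      · subst hde
        rw [if_pos rfl]
        have hfx : List.filter (fun s => decide (g s = ((g x).toNat : Int))) [x] = [x] := by
          simp [hdx]
        rw [hfx, sorted_append_one]
        apply insertBy_congr
        intro y hy
        have hyy := (PySem.List.mem_sorted _ _ _ _).1 hy
        have hgy : g y = ((g x).toNat : Int) := by simpa using (List.of_mem_filter hyy)
        apply decide_eq_decide.2
        rw [pvLex_cons_iff_of_eq (by omega)]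
      · rw [if_neg hde]
        have hne : ¬ (g x = (e : Int)) := by omega
        have hfx : List.filter (fun s => decide (g s = (e : Int))) [x] = [] := by simp [hne]
        rw [hfx, List.append_nil]
    rw [hmap, ← insertBy_flatten (List.range 256) _ _ x (g x).toNat List.pairwise_lt_range
        (by simp [List.mem_range]; omega) ?hlt ?hgt]
    · rw [ih hgl, ← sorted_append_one]
    case hlt =>
      intro e he hed y hy
      have hyy := (PySem.List.mem_sorted _ _ _ _).1 hy
      have hgy : g y = (e : Int) := by simpa using (List.of_mem_filter hyy)
      simp only [decide_eq_false_iff_not, List.cons_lt_cons_iff, not_or, not_and]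
      exact ⟨by omega, fun h1 => absurd h1 (by omega)⟩
    case hgt =>
      intro e he hed y hy
      have hyy := (PySem.List.mem_sorted _ _ _ _).1 hy
      have hgy : g y = (e : Int) := by simpa using (List.of_mem_filter hyy)
      simp only [decide_eq_true_eq, List.cons_lt_cons_iff]
      exact Or.inl (by omega)


-- ---------- pyGetD / set bridges ----------
lemma pvPyGetD_set_self {α : Type} (l : List α) (n : Nat) (v d : α) (h : n < l.length) :
    PySem.List.pyGetD (l.set n v) (n : Int) d = v := by
  unfold PySem.List.pyGetD PySem.List.pyGet? PySem.List.pyIdx?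
  rw [if_pos (Int.natCast_nonneg n), if_pos (by simp only [List.length_set]; exact_mod_cast h)]
  simp [List.getElem?_set_self h]

lemma pvPyGetD_set_ne {α : Type} (l : List α) (n : Nat) (m : Int) (v d : α) (h0 : 0 ≤ m)
    (h : m ≠ (n : Int)) :
    PySem.List.pyGetD (l.set n v) m d = PySem.List.pyGetD l m d := by
  unfold PySem.List.pyGetD PySem.List.pyGet? PySem.List.pyIdx?
  simp only [List.length_set]
  rw [if_pos h0]
  by_cases hm : m < (l.length : Int)
  · rw [if_pos hm]
    have hne : (l.set n v)[m.toNat]? = l[m.toNat]? := List.getElem?_set_ne (by omega)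
    simp [hne]
  · rw [if_neg hm]
    rfl

lemma pvPyGetD_append_left {α : Type} (l l2 : List α) (j : Int) (d : α) (h0 : 0 ≤ j)
    (h : j < (l.length : Int)) :
    PySem.List.pyGetD (l ++ l2) j d = PySem.List.pyGetD l j d := by
  unfold PySem.List.pyGetD PySem.List.pyGet? PySem.List.pyIdx?
  rw [if_pos h0, if_pos (by push_cast [List.length_append, List.length_cons, List.length_nil]; omega)]
  rw [if_pos h0, if_pos h]
  have hne : (l ++ l2)[j.toNat]? = l[j.toNat]? := List.getElem?_append_left (by omega)
  simp [hne]

lemma pvPyGetD_concat_last {α : Type} (l : List α) (x : α) (d : α) :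
    PySem.List.pyGetD (l ++ [x]) (l.length : Int) d = x := by
  unfold PySem.List.pyGetD PySem.List.pyGet? PySem.List.pyIdx?
  rw [if_pos (Int.natCast_nonneg _), if_pos (by push_cast [List.length_append, List.length_cons, List.length_nil]; omega)]
  simp [List.getElem?_concat_length]

-- ---------- pyRange with step -1 ----------
lemma pvPyRange_neg_one_nil : PySem.List.pyRange (-1) (-1) (-1) = [] := by decide

lemma pvPyRange_neg_one_cons (a : Int) (h : 0 ≤ a) :
    PySem.List.pyRange a (-1) (-1) = a :: PySem.List.pyRange (a - 1) (-1) (-1) := by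
  unfold PySem.List.pyRange
  norm_num
  rw [show (if (-1:Int) < a then (a + 1).toNat else 0) = a.toNat + 1 by rw [if_pos (by omega : (-1:Int) < a)]; omega,
    show (if (0:Int) < a then a.toNat else 0) = a.toNat by split <;> omega,
    List.range_succ_eq_map, List.map_cons, List.map_map]
  simp only [List.cons.injEq]
  refine ⟨by simp, ?_⟩
  apply List.map_congr_left
  intro k _
  simp only [Function.comp]
  push_cast
  ring

lemma pvMem_pyRange_neg {a x : Int} (h : x ∈ PySem.List.pyRange a (-1) (-1)) : 0 ≤ x ∧ x ≤ a := by
  unfold PySem.List.pyRange at h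
  norm_num at h
  obtain ⟨k, hk, rfl⟩ := h
  split at hk <;> omega

-- the backwards index loop of counting_sort is a fold over the reversed list
lemma foldl_pyRange_rev {α σ : Type} (l : List α) (d : α) (f : σ → α → σ) (init : σ) :
    (PySem.List.pyRange ((PySem.List.len l) - 1) (-1) (-1)).foldl
        (fun st j => f st (PySem.List.pyGetD l j d)) init
      = l.reverse.foldl f init := by
  induction l using List.reverseRecOn generalizing init with
  | nil => rw [show PySem.List.len ([] : List α) - 1 = -1 from rfl, pvPyRange_neg_one_nil]; rfl
  | append_singleton l x ih =>
    have hlen : PySem.List.len (l ++ [x]) - 1 = (l.length : Int) := by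
      simp [PySem.List.len]
    rw [hlen, pvPyRange_neg_one_cons _ (Int.natCast_nonneg _), List.foldl_cons,
      pvPyGetD_concat_last]
    have hcg : ∀ (st : σ) (j : Int), j ∈ PySem.List.pyRange ((l.length : Int) - 1) (-1) (-1) →
        f st (PySem.List.pyGetD (l ++ [x]) j d) = f st (PySem.List.pyGetD l j d) := by
      intro st j hj
      have hb := pvMem_pyRange_neg hj
      rw [pvPyGetD_append_left _ _ _ _ hb.1 (by omega)]
    rw [PySem.List.foldl_congr_mem _ _ (fun st j => f st (PySem.List.pyGetD l j d)) _
      (fun st j hj => hcg st j hj)]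
    rw [List.reverse_concat, List.foldl_cons]
    have hl : (l.length : Int) - 1 = PySem.List.len l - 1 := rfl
    rw [hl, ih]

-- ---------- set / insertIdx commutation ----------
lemma set_insertIdx_of_lt {α : Type} (b : List α) (pos m : Nat) (x s : α) (hm : m < pos) :
    (b.insertIdx pos x).set m s = (b.set m s).insertIdx pos x := by
  induction b generalizing pos m with
  | nil =>
    match pos, hm with
    | p + 1, _ => simp
  | cons y b ih =>
    match pos, hm with
    | p + 1, hm =>
      rw [List.insertIdx_succ_cons]
      match m with
      | 0 => simp [List.insertIdx_succ_cons]
      | m + 1 =>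
        simp only [List.set_cons_succ, List.insertIdx_succ_cons]
        rw [ih p m (by omega)]

lemma set_insertIdx_of_ge {α : Type} (b : List α) (pos m : Nat) (x s : α) (hm : pos ≤ m)
    (hlen : m < b.length) :
    (b.insertIdx pos x).set (m + 1) s = (b.set m s).insertIdx pos x := by
  induction b generalizing pos m with
  | nil => simp at hlen
  | cons y b ih =>
    match pos with
    | 0 => simp [List.insertIdx_zero]
    | p + 1 =>
      match m, hm with
      | m + 1, hm =>
        simp only [List.insertIdx_succ_cons, List.set_cons_succ]
        rw [ih p m (by omega) (by simpa using hlen)]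

lemma replicate_set_eq_insertIdx {α : Type} (n pos : Nat) (a x : α) (hpos : pos ≤ n) :
    (List.replicate (n + 1) a).set pos x = (List.replicate n a).insertIdx pos x := by
  induction n generalizing pos with
  | zero =>
    match pos, hpos with
    | 0, _ => simp
  | succ n ih =>
    match pos with
    | 0 => simp [List.replicate_succ, List.insertIdx_zero]
    | p + 1 =>
      have h1 : List.replicate (n + 2) a = a :: List.replicate (n + 1) a := rfl
      have h2 : List.replicate (n + 1) a = a :: List.replicate n a := rfl
      rw [h1, List.set_cons_succ, ih p (by omega), h2, List.insertIdx_succ_cons]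


-- convenient forms of the set/get bridges with an Int index
lemma pvPyGetD_set_self' {α : Type} (l : List α) (dIdx : Int) (v d : α) (h0 : 0 ≤ dIdx)
    (h : dIdx < (l.length : Int)) :
    PySem.List.pyGetD (l.set dIdx.toNat v) dIdx d = v := by
  have := pvPyGetD_set_self l dIdx.toNat v d (by omega)
  rwa [Int.toNat_of_nonneg h0] at this

lemma pvPyGetD_set_ne' {α : Type} (l : List α) (dIdx m : Int) (v d : α) (h0d : 0 ≤ dIdx)
    (h0 : 0 ≤ m) (h : m ≠ dIdx) :
    PySem.List.pyGetD (l.set dIdx.toNat v) m d = PySem.List.pyGetD l m d :=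
  pvPyGetD_set_ne l dIdx.toNat m v d h0 (by omega)

lemma pvPyGetD_replicate_zero (e : Int) (h : 0 ≤ e) (n : Nat) :
    PySem.List.pyGetD (List.replicate n (0 : Int)) e 0 = 0 := by
  unfold PySem.List.pyGetD PySem.List.pyGet? PySem.List.pyIdx?
  rw [if_pos h]
  by_cases he : e < ((List.replicate n (0:Int)).length : Int)
  · rw [if_pos (by simpa using he)]
    have : (List.replicate n (0:Int))[e.toNat]? = some 0 := by
      rw [List.getElem?_eq_getElem (by simp at he ⊢; omega)]
      simp
    simp [this]
  · rw [if_neg (by simpa using he)]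
    rfl

-- ---------- counting predicates ----------
lemma pvCountP_le_succ (l : List String) (g : String → Int) (e : Int) :
    l.countP (fun s => decide (g s ≤ e + 1))
      = l.countP (fun s => decide (g s ≤ e)) + l.countP (fun s => decide (g s = e + 1)) := by
  induction l with
  | nil => rfl
  | cons s l ih =>
    simp only [List.countP_cons, ih]
    by_cases h1 : g s ≤ e + 1 <;> by_cases h2 : g s ≤ e <;> by_cases h3 : g s = e + 1 <;>
      simp [h1, h2, h3] <;> omega

lemma pvCountP_le_zero (l : List String) (g : String → Int) (h : ∀ s ∈ l, 0 ≤ g s) :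
    l.countP (fun s => decide (g s ≤ 0)) = l.countP (fun s => decide (g s = 0)) := by
  induction l with
  | nil => rfl
  | cons s l ih =>
    have hs := h s (by simp)
    simp only [List.countP_cons, ih (fun t ht => h t (by simp [ht]))]
    by_cases h1 : g s ≤ 0 <;> by_cases h2 : g s = (0:Int) <;> simp [h1, h2] <;> omega

-- prefix sums
def psumF (f : Nat → Int) : Nat → Int
  | 0 => f 0
  | e + 1 => psumF f e + f (e + 1)

lemma psumF_eq_countP_le (l : List String) (g : String → Int) (h : ∀ s ∈ l, 0 ≤ g s) (e : Nat) :
    psumF (fun e' => (l.countP (fun s => decide (g s = (e' : Int))) : Int)) e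
      = (l.countP (fun s => decide (g s ≤ (e : Int))) : Int) := by
  induction e with
  | zero =>
    show ((l.countP (fun s => decide (g s = ((0:Nat) : Int))) : Int)) = _
    rw [show (((0:Nat)) : Int) = 0 by norm_num, ← pvCountP_le_zero l g h]
  | succ e ih =>
    show psumF _ e + _ = _
    rw [ih]
    have := pvCountP_le_succ l g (e : Int)
    push_cast
    push_cast at this
    omega

-- ---------- the first counting loop ----------
lemma loop1_len (g : String → Int) (l : List String) (c : List Int) :
    (l.foldl (fun c s => c.set (g s).toNat (PySem.List.pyGetD c (g s) 0 + 1)) c).length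
      = c.length := by
  induction l generalizing c with
  | nil => rfl
  | cons s l ih => rw [List.foldl_cons, ih]; simp

lemma loop1_get (l : List String) (g : String → Int) (hg : ∀ s ∈ l, 0 ≤ g s ∧ g s ≤ 255)
    (c : List Int) (hc : c.length = 256) (e : Nat) (he : e < 256) :
    PySem.List.pyGetD
        (l.foldl (fun c s => c.set (g s).toNat (PySem.List.pyGetD c (g s) 0 + 1)) c) (e : Int) 0
      = PySem.List.pyGetD c (e : Int) 0 + (l.countP (fun s => decide (g s = (e : Int))) : Int) := by
  induction l generalizing c with
  | nil => simp
  | cons s l ih =>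
    have hs := hg s (by simp)
    rw [List.foldl_cons, ih (fun t ht => hg t (by simp [ht])) _ (by simp [hc])]
    rw [List.countP_cons]
    by_cases hes : (e : Int) = g s
    · rw [hes, pvPyGetD_set_self' _ _ _ _ hs.1 (by rw [hc]; omega)]
      simp
      omega
    · rw [pvPyGetD_set_ne' _ _ _ _ _ hs.1 (Int.natCast_nonneg e) hes]
      have hne2 : ¬ (g s = (e : Int)) := fun hh => hes hh.symm
      simp [hne2]

-- ---------- the prefix-sum loop ----------
lemma loop2_spec (orig : Nat → Int) :
    ∀ (m a : Nat) (c : List Int), a = 256 - m → 1 ≤ a → a ≤ 256 → c.length = 256 →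
    (∀ e : Nat, e < a → PySem.List.pyGetD c (e : Int) 0 = psumF orig e) →
    (∀ e : Nat, a ≤ e → e < 256 → PySem.List.pyGetD c (e : Int) 0 = orig e) →
    ∀ e : Nat, e < 256 →
      PySem.List.pyGetD ((PySem.List.pyRange (a : Int) 256).foldl
          (fun c i => c.set i.toNat (PySem.List.pyGetD c i 0 + PySem.List.pyGetD c (i - 1) 0)) c)
        (e : Int) 0
      = psumF orig e := by
  intro m
  induction m with
  | zero =>
    intro a c ha h1 h2 hc hpre hrest e he
    have ha' : a = 256 := by omega
    subst ha'
    rw [pvPyRange_one_nil (by norm_num)]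
    exact hpre e he
  | succ m ih =>
    intro a c ha h1 h2 hc hpre hrest e he
    have halt : (a : Int) < 256 := by omega
    rw [PySem.List.pyRange_one_cons halt, List.foldl_cons]
    obtain ⟨b, rfl⟩ : ∃ b, a = b + 1 := ⟨a - 1, by omega⟩
    have hread1 : PySem.List.pyGetD c ((b + 1 : Nat) : Int) 0 = orig (b + 1) :=
      hrest (b + 1) (le_refl _) (by omega)
    have hread2 : PySem.List.pyGetD c (((b + 1 : Nat) : Int) - 1) 0 = psumF orig b := by
      rw [show (((b + 1 : Nat) : Int) - 1) = ((b : Nat) : Int) by push_cast; ring]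
      exact hpre b (by omega)
    have hnewlen : (c.set ((b + 1 : Nat) : Int).toNat
        (PySem.List.pyGetD c ((b + 1 : Nat) : Int) 0 +
          PySem.List.pyGetD c (((b + 1 : Nat) : Int) - 1) 0)).length = 256 := by
      simp [hc]
    have hstep := ih (b + 2)
      (c.set ((b + 1 : Nat) : Int).toNat
        (PySem.List.pyGetD c ((b + 1 : Nat) : Int) 0 + PySem.List.pyGetD c (((b + 1 : Nat) : Int) - 1) 0))
      (by omega) (by omega) (by omega) hnewlen ?pre ?rest
    case pre =>
      intro e' he'
      by_cases hee : e' = b + 1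
      · subst hee
        rw [pvPyGetD_set_self' _ _ _ _ (Int.natCast_nonneg _) (by rw [hc]; push_cast; omega)]
        rw [hread1, hread2]
        show _ = psumF orig b + orig (b + 1)
        omega
      · rw [pvPyGetD_set_ne' _ _ _ _ _ (Int.natCast_nonneg _) (Int.natCast_nonneg _)
          (by exact_mod_cast fun hh => hee (by exact_mod_cast hh))]
        exact hpre e' (by omega)
    case rest =>
      intro e' he1 he2
      rw [pvPyGetD_set_ne' _ _ _ _ _ (Int.natCast_nonneg _) (Int.natCast_nonneg _)
        (by exact_mod_cast fun hh => (by omega : ¬ e' = b + 1) (by exact_mod_cast hh))]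
      exact hrest e' (by omega) he2
    have hcast : ((b + 1 : Nat) : Int) + 1 = ((b + 2 : Nat) : Int) := by push_cast; ring
    rw [hcast]
    exact hstep e he


-- one step of the placement loop of counting_sort
def stepCS (g : String → Int) (bc : List String × List Int) (s : String) :
    List String × List Int :=
  (bc.1.set (PySem.List.pyGetD bc.2 (g s) 0 - 1).toNat s,
   bc.2.set (g s).toNat (PySem.List.pyGetD bc.2 (g s) 0 - 1))

lemma simCS (g : String → Int) (x : String) :
    ∀ (r : List String) (pos : Nat) (b1 : List String) (c1 c2 : List Int),
    (∀ s ∈ r, 0 ≤ g s ∧ g s ≤ 255) →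
    c1.length = 256 → c2.length = 256 →
    (∀ e : Nat, e < 256 → PySem.List.pyGetD c2 (e : Int) 0
        = PySem.List.pyGetD c1 (e : Int) 0 + (if g x < (e : Int) then 1 else 0)) →
    (∀ e : Nat, e < 256 → (r.countP (fun s => decide (g s = (e : Int))) : Int)
        ≤ PySem.List.pyGetD c1 (e : Int) 0) →
    (∀ e : Nat, e < 256 → PySem.List.pyGetD c1 (e : Int) 0 ≤ (b1.length : Int)) →
    (∀ e : Nat, e < 256 → g x < (e : Int) →
        (pos : Int) + (r.countP (fun s => decide (g s = (e : Int))) : Int)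
          ≤ PySem.List.pyGetD c1 (e : Int) 0) →
    (∀ e : Nat, e < 256 → (e : Int) ≤ g x → PySem.List.pyGetD c1 (e : Int) 0 ≤ (pos : Int)) →
    pos ≤ b1.length →
    (r.foldl (stepCS g) (b1.insertIdx pos x, c2)).1
      = ((r.foldl (stepCS g) (b1, c1)).1).insertIdx pos x := by
  intro r
  induction r with
  | nil =>
    intro pos b1 c1 c2 _ _ _ _ _ _ _ _ _
    rfl
  | cons s r ih =>
    intro pos b1 c1 c2 hg hc1 hc2 hrel hcnt hub hgt hle hpos
    have hs := hg s (by simp)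
    have hcast : (((g s).toNat) : Int) = g s := Int.toNat_of_nonneg hs.1
    have he0 : (g s).toNat < 256 := by omega
    have hrel0 := hrel (g s).toNat he0
    have hcnt0 := hcnt (g s).toNat he0
    have hub0 := hub (g s).toNat he0
    rw [hcast] at hrel0 hcnt0 hub0
    have hsplit_self : ((s :: r).countP (fun t => decide (g t = g s)) : Int)
        = (r.countP (fun t => decide (g t = g s)) : Int) + 1 := by
      rw [List.countP_cons]
      simp
    have hskip : ∀ e : Nat, ¬ ((e : Int) = g s) →
        (s :: r).countP (fun t => decide (g t = (e : Int)))
          = r.countP (fun t => decide (g t = (e : Int))) := by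
      intro e hee
      rw [List.countP_cons]
      simp [show ¬ (g s = (e : Int)) from fun hh => hee hh.symm]
    have hcnt0' : (r.countP (fun t => decide (g t = g s)) : Int) + 1
        ≤ PySem.List.pyGetD c1 (g s) 0 := by
      rw [hsplit_self] at hcnt0
      omega
    have hq1pos : 1 ≤ PySem.List.pyGetD c1 (g s) 0 := by
      have : (0 : Int) ≤ (r.countP (fun t => decide (g t = g s)) : Int) := by positivity
      omega
    simp only [List.foldl_cons]
    have hstep_big : stepCS g (b1.insertIdx pos x, c2) s
        = ((b1.insertIdx pos x).set (PySem.List.pyGetD c2 (g s) 0 - 1).toNat s,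
           c2.set (g s).toNat (PySem.List.pyGetD c2 (g s) 0 - 1)) := rfl
    have hstep_small : stepCS g (b1, c1) s
        = (b1.set (PySem.List.pyGetD c1 (g s) 0 - 1).toNat s,
           c1.set (g s).toNat (PySem.List.pyGetD c1 (g s) 0 - 1)) := rfl
    rw [hstep_big, hstep_small]
    have hbig_b : (b1.insertIdx pos x).set (PySem.List.pyGetD c2 (g s) 0 - 1).toNat s
        = (b1.set (PySem.List.pyGetD c1 (g s) 0 - 1).toNat s).insertIdx pos x := by
      by_cases hA : g x < g s
      · rw [hrel0, if_pos hA]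
        have hge : (pos : Int) + 1 ≤ PySem.List.pyGetD c1 (g s) 0 := by
          have h' := hgt (g s).toNat he0 (by rw [hcast]; exact hA)
          rw [hcast] at h'
          omega
        have h1 : (PySem.List.pyGetD c1 (g s) 0 + 1 - 1).toNat
            = (PySem.List.pyGetD c1 (g s) 0 - 1).toNat + 1 := by omega
        rw [h1]
        exact set_insertIdx_of_ge _ _ _ _ _ (by omega) (by omega)
      · rw [hrel0, if_neg hA]
        have hlt : PySem.List.pyGetD c1 (g s) 0 ≤ (pos : Int) := by
          have h' := hle (g s).toNat he0 (by rw [hcast]; omega)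
          rwa [hcast] at h'
        have h1 : PySem.List.pyGetD c1 (g s) 0 + 0 - 1 = PySem.List.pyGetD c1 (g s) 0 - 1 := by
          ring
        rw [h1]
        exact set_insertIdx_of_lt _ _ _ _ _ (by omega)
    rw [hbig_b]
    refine ih pos _ _ _ (fun t ht => hg t (by simp [ht])) (by simp [hc1]) (by simp [hc2])
      ?rel ?cnt ?ub ?gt ?le ?pos
    case rel =>
      intro e he
      by_cases hee : (e : Int) = g s
      · rw [hee, pvPyGetD_set_self' _ _ _ _ hs.1 (by rw [hc2]; omega),
          pvPyGetD_set_self' _ _ _ _ hs.1 (by rw [hc1]; omega), hrel0]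
        by_cases hA : g x < g s <;> simp [hA] <;> ring
      · rw [pvPyGetD_set_ne' _ _ _ _ _ hs.1 (Int.natCast_nonneg e) hee,
          pvPyGetD_set_ne' _ _ _ _ _ hs.1 (Int.natCast_nonneg e) hee]
        exact hrel e he
    case cnt =>
      intro e he
      by_cases hee : (e : Int) = g s
      · rw [hee, pvPyGetD_set_self' _ _ _ _ hs.1 (by rw [hc1]; omega)]
        omega
      · rw [pvPyGetD_set_ne' _ _ _ _ _ hs.1 (Int.natCast_nonneg e) hee, ← hskip e hee]
        exact hcnt e he
    case ub =>
      intro e he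
      rw [List.length_set]
      by_cases hee : (e : Int) = g s
      · rw [hee, pvPyGetD_set_self' _ _ _ _ hs.1 (by rw [hc1]; omega)]
        omega
      · rw [pvPyGetD_set_ne' _ _ _ _ _ hs.1 (Int.natCast_nonneg e) hee]
        exact hub e he
    case gt =>
      intro e he hxe
      by_cases hee : (e : Int) = g s
      · rw [hee, pvPyGetD_set_self' _ _ _ _ hs.1 (by rw [hc1]; omega)]
        have h' := hgt e he hxe
        rw [hee] at h'
        omega
      · rw [pvPyGetD_set_ne' _ _ _ _ _ hs.1 (Int.natCast_nonneg e) hee, ← hskip e hee]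
        exact hgt e he hxe
    case le =>
      intro e he hex
      by_cases hee : (e : Int) = g s
      · rw [hee, pvPyGetD_set_self' _ _ _ _ hs.1 (by rw [hc1]; omega)]
        have h' := hle e he hex
        rw [hee] at h'
        omega
      · rw [pvPyGetD_set_ne' _ _ _ _ _ hs.1 (Int.natCast_nonneg e) hee]
        exact hle e he hex
    case pos =>
      rw [List.length_set]
      exact hpos


lemma pvCountP_le_add (l : List String) (g : String → Int) (d e : Int) (hde : d < e) :
    l.countP (fun s => decide (g s ≤ d)) + l.countP (fun s => decide (g s = e))
      ≤ l.countP (fun s => decide (g s ≤ e)) := by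
  induction l with
  | nil => simp
  | cons s l ih =>
    simp only [List.countP_cons]
    by_cases h1 : g s ≤ d <;> by_cases h2 : g s = e <;> by_cases h3 : g s ≤ e <;>
      simp [h1, h2, h3, show ¬ (e ≤ d) by omega] <;> omega

-- the intermediate arrays of counting_sort, named
def loop1T (m : List String) (idx : Int) : List Int :=
  m.foldl (fun c s => c.set (pyGetDigit s idx).toNat
    (PySem.List.pyGetD c (pyGetDigit s idx) 0 + 1)) (List.replicate 256 0)

def c2T (m : List String) (idx : Int) : List Int :=
  (PySem.List.pyRange 1 256).foldl
    (fun c i => c.set i.toNat (PySem.List.pyGetD c i 0 + PySem.List.pyGetD c (i - 1) 0))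
    (loop1T m idx)

lemma loop1T_len (m : List String) (idx : Int) : (loop1T m idx).length = 256 := by
  unfold loop1T
  rw [loop1_len (fun s => pyGetDigit s idx) m (List.replicate 256 0)]
  exact List.length_replicate

lemma c2T_len (m : List String) (idx : Int) : (c2T m idx).length = 256 := by
  unfold c2T
  have h : ∀ (rs : List Int) (c : List Int),
      (rs.foldl (fun c i => c.set i.toNat
        (PySem.List.pyGetD c i 0 + PySem.List.pyGetD c (i - 1) 0)) c).length = c.length := by
    intro rs
    induction rs with
    | nil => intro c; rfl
    | cons a rs ih => intro c; rw [List.foldl_cons, ih]; simp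
  rw [h, loop1T_len]

-- counting_sort as a fold over the reversed input
lemma countingSort_eq_run (l : List String) (idx : Int) :
    countingSort l idx
      = (l.reverse.foldl (stepCS (fun s => pyGetDigit s idx))
          (List.replicate l.length "", c2T l idx)).1 := by
  by_cases h0 : l = []
  · subst h0; rfl
  · have hguard : ¬ (PySem.List.len l = (0 : Int)) := by
      have : PySem.List.len l = (l.length : Int) := rfl
      rw [this]
      simp [List.length_eq_zero_iff, h0]
    simp only [countingSort]
    rw [if_neg hguard]
    have hl1 : (PySem.List.pyRange 0 (PySem.List.len l)).foldl
        (fun c i => c.set (pyGetDigit (PySem.List.pyGetD l i "") idx).toNat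
          (PySem.List.pyGetD c (pyGetDigit (PySem.List.pyGetD l i "") idx) 0 + 1))
        (List.replicate 256 0)
        = loop1T l idx := by
      have h := PySem.List.foldl_pyRange_pyGetD l ""
        (fun c s => c.set (pyGetDigit s idx).toNat
          (PySem.List.pyGetD c (pyGetDigit s idx) 0 + 1))
        (List.replicate 256 (0 : Int)) (le_refl 0)
      rw [show (0 : Int).toNat = 0 from rfl, List.drop_zero] at h
      exact h
    rw [hl1]
    exact congrArg Prod.fst (foldl_pyRange_rev l "" (stepCS (fun s => pyGetDigit s idx)) _)

-- the c array after the two counting loops holds cumulative counts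
lemma c2T_spec (m : List String) (idx : Int)
    (hm : ∀ s ∈ m, 0 ≤ pyGetDigit s idx ∧ pyGetDigit s idx ≤ 255) (e : Nat) (he : e < 256) :
    PySem.List.pyGetD (c2T m idx) (e : Int) 0
      = (m.countP (fun s => decide (pyGetDigit s idx ≤ (e : Int))) : Int) := by
  have h1 : ∀ e' : Nat, e' < 256 →
      PySem.List.pyGetD (loop1T m idx) (e' : Int) 0
        = (m.countP (fun s => decide (pyGetDigit s idx = (e' : Int))) : Int) := by
    intro e' he'
    unfold loop1T
    rw [loop1_get m _ hm _ List.length_replicate e' he',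
      pvPyGetD_replicate_zero _ (Int.natCast_nonneg _) _]
    ring
  have h2 := loop2_spec
      (fun e' => (m.countP (fun s => decide (pyGetDigit s idx = (e' : Int))) : Int))
      255 1 (loop1T m idx) (by omega) (by omega) (by omega) (loop1T_len m idx) ?pre ?rest
  case pre =>
    intro e' he'
    have he0 : e' = 0 := by omega
    subst he0
    exact h1 0 (by omega)
  case rest =>
    intro e' h1' h2'
    exact h1 e' h2'
  have h2e := h2 e he
  simp only [Nat.cast_one] at h2e
  unfold c2T
  rw [h2e, psumF_eq_countP_le m _ (fun s hs => (hm s hs).1) e]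

lemma cs_insert (l : List String) (x : String) (idx : Int)
    (hg : ∀ s ∈ l ++ [x], 0 ≤ pyGetDigit s idx ∧ pyGetDigit s idx ≤ 255) :
    countingSort (l ++ [x]) idx
      = (countingSort l idx).insertIdx
          (l.countP (fun s => decide (pyGetDigit s idx ≤ pyGetDigit x idx))) x := by
  have hgl : ∀ s ∈ l, 0 ≤ pyGetDigit s idx ∧ pyGetDigit s idx ≤ 255 :=
    fun s hs => hg s (by simp [hs])
  have hgx := hg x (by simp)
  have hcastx : ((pyGetDigit x idx).toNat : Int) = pyGetDigit x idx := Int.toNat_of_nonneg hgx.1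
  have hpos_le : l.countP (fun s => decide (pyGetDigit s idx ≤ pyGetDigit x idx)) ≤ l.length :=
    List.countP_le_length
  rw [countingSort_eq_run, countingSort_eq_run, List.reverse_concat, List.foldl_cons]
  -- the value read for x in the first step
  have hread : PySem.List.pyGetD (c2T (l ++ [x]) idx) (pyGetDigit x idx) 0
      = (l.countP (fun s => decide (pyGetDigit s idx ≤ pyGetDigit x idx)) : Int) + 1 := by
    have h := c2T_spec (l ++ [x]) idx hg (pyGetDigit x idx).toNat (by omega)
    rw [hcastx] at h
    rw [h, List.countP_append]
    have hx1 : [x].countP (fun s => decide (pyGetDigit s idx ≤ pyGetDigit x idx)) = 1 := by simp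
    rw [hx1]
    push_cast
    ring
  have hstep1 : stepCS (fun s => pyGetDigit s idx)
      (List.replicate (l ++ [x]).length "", c2T (l ++ [x]) idx) x
      = ((List.replicate l.length "").insertIdx
            (l.countP (fun s => decide (pyGetDigit s idx ≤ pyGetDigit x idx))) x,
         (c2T (l ++ [x]) idx).set (pyGetDigit x idx).toNat
           ((l.countP (fun s => decide (pyGetDigit s idx ≤ pyGetDigit x idx)) : Int))) := by
    unfold stepCS
    rw [hread]
    have hval : ((l.countP (fun s => decide (pyGetDigit s idx ≤ pyGetDigit x idx)) : Int) + 1 - 1)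
        = ((l.countP (fun s => decide (pyGetDigit s idx ≤ pyGetDigit x idx)) : Nat) : Int) := by
      ring
    rw [hval, Int.toNat_natCast, show (l ++ [x]).length = l.length + 1 by simp,
      replicate_set_eq_insertIdx _ _ _ _ hpos_le]
  rw [hstep1]
  refine simCS (fun s => pyGetDigit s idx) x l.reverse
    (l.countP (fun s => decide (pyGetDigit s idx ≤ pyGetDigit x idx)))
    (List.replicate l.length "") (c2T l idx) _
    (fun t ht => hgl t (by simpa using ht)) (c2T_len l idx)
    (by rw [List.length_set]; exact c2T_len _ _)
    ?rel ?cnt ?ub ?gt ?le (by simpa using hpos_le)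
  case rel =>
    beta_reduce
    intro e he
    by_cases hee : (e : Int) = pyGetDigit x idx
    · rw [hee, pvPyGetD_set_self' _ _ _ _ hgx.1 (by rw [c2T_len]; omega)]
      have hs := c2T_spec l idx hgl (pyGetDigit x idx).toNat (by omega)
      rw [hcastx] at hs
      rw [hs, if_neg (lt_irrefl _)]
      ring
    · rw [pvPyGetD_set_ne' _ _ _ _ _ hgx.1 (Int.natCast_nonneg e) hee,
        c2T_spec (l ++ [x]) idx hg e he, c2T_spec l idx hgl e he, List.countP_append]
      have hxcnt : [x].countP (fun s => decide (pyGetDigit s idx ≤ (e : Int)))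
          = if pyGetDigit x idx ≤ (e : Int) then 1 else 0 := by
        by_cases hc : pyGetDigit x idx ≤ (e : Int) <;> simp [hc]
      rw [hxcnt]
      have hne : pyGetDigit x idx ≠ (e : Int) := fun hh => hee hh.symm
      by_cases hc : pyGetDigit x idx ≤ (e : Int)
      · rw [if_pos hc, if_pos (by omega)]
        push_cast
        ring
      · rw [if_neg hc, if_neg (by omega)]
        push_cast
        ring
  case cnt =>
    intro e he
    rw [c2T_spec l idx hgl e he, List.countP_reverse]
    have := List.countP_mono_left
      (l := l) (p := fun s => decide (pyGetDigit s idx = (e : Int)))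
      (q := fun s => decide (pyGetDigit s idx ≤ (e : Int)))
      (fun s hs hh => by simp at hh ⊢; omega)
    exact_mod_cast this
  case ub =>
    intro e he
    rw [c2T_spec l idx hgl e he, List.length_replicate]
    exact_mod_cast List.countP_le_length
  case gt =>
    beta_reduce
    intro e he hxe
    rw [c2T_spec l idx hgl e he, List.countP_reverse]
    have := pvCountP_le_add l (fun s => pyGetDigit s idx) (pyGetDigit x idx) (e : Int) hxe
    push_cast
    push_cast at this
    omega
  case le =>
    beta_reduce
    intro e he hex
    rw [c2T_spec l idx hgl e he]
    have := List.countP_mono_left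
      (l := l) (p := fun s => decide (pyGetDigit s idx ≤ (e : Int)))
      (q := fun s => decide (pyGetDigit s idx ≤ pyGetDigit x idx))
      (fun s hs hh => by simp at hh ⊢; omega)
    exact_mod_cast this

-- counting_sort is the stable sort by the digit at the given position
lemma cs_sorted (l : List String) (idx : Int)
    (hg : ∀ s ∈ l, 0 ≤ pyGetDigit s idx ∧ pyGetDigit s idx ≤ 255) :
    countingSort l idx = PySem.List.sorted l (fun s => pyGetDigit s idx) := by
  induction l using List.reverseRecOn with
  | nil => rfl
  | append_singleton l x ih =>
    rw [cs_insert l x idx hg, ih (fun s hs => hg s (by simp [hs])), sorted_append_one,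
      insertBy_sorted_eq_insertIdx _ _ _ (PySem.List.sorted_pairwise _ _)]
    congr 1
    exact ((PySem.List.sorted_perm l (fun s => pyGetDigit s idx) false).countP_eq _).symm


-- ---------- the bucket-filling loop ----------
lemma bucketize_eq_foldl (l2 : List String) (idx : Int) :
    bucketize l2 idx = l2.foldl (fun bs s => bs.set (pyGetDigit s idx).toNat
      (PySem.List.pyGetD bs (pyGetDigit s idx) [] ++ [s])) (List.replicate 256 []) := by
  unfold bucketize
  have h := PySem.List.foldl_pyRange_pyGetD l2 ""
    (fun bs s => bs.set (pyGetDigit s idx).toNat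
      (PySem.List.pyGetD bs (pyGetDigit s idx) [] ++ [s]))
    (List.replicate 256 ([] : List String)) (le_refl 0)
  rw [show (0 : Int).toNat = 0 from rfl, List.drop_zero] at h
  exact h

lemma bucketize_fold_len (l2 : List String) (idx : Int) (bs : List (List String)) :
    (l2.foldl (fun bs s => bs.set (pyGetDigit s idx).toNat
      (PySem.List.pyGetD bs (pyGetDigit s idx) [] ++ [s])) bs).length = bs.length := by
  induction l2 generalizing bs with
  | nil => rfl
  | cons s l2 ih => rw [List.foldl_cons, ih]; simp

lemma bucketize_fold_get (l2 : List String) (idx : Int)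
    (hg : ∀ s ∈ l2, 0 ≤ pyGetDigit s idx ∧ pyGetDigit s idx ≤ 255) :
    ∀ (bs : List (List String)), bs.length = 256 → ∀ (e : Nat), e < 256 →
    PySem.List.pyGetD (l2.foldl (fun bs s => bs.set (pyGetDigit s idx).toNat
        (PySem.List.pyGetD bs (pyGetDigit s idx) [] ++ [s])) bs) (e : Int) []
      = PySem.List.pyGetD bs (e : Int) []
          ++ l2.filter (fun s => decide (pyGetDigit s idx = (e : Int))) := by
  induction l2 with
  | nil => intro bs _ e _; simp
  | cons s l2 ih =>
    intro bs hbs e he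
    have hs := hg s (by simp)
    rw [List.foldl_cons, ih (fun t ht => hg t (by simp [ht])) _ (by simp [hbs]) e he,
      List.filter_cons]
    by_cases hes : (e : Int) = pyGetDigit s idx
    · rw [hes, pvPyGetD_set_self' _ _ _ _ hs.1 (by rw [hbs]; omega)]
      simp
    · rw [pvPyGetD_set_ne' _ _ _ _ _ hs.1 (Int.natCast_nonneg e) hes]
      have hne2 : ¬ (pyGetDigit s idx = (e : Int)) := fun hh => hes hh.symm
      simp [hne2]

lemma bucketize_eq_map (l2 : List String) (idx : Int)
    (hg : ∀ s ∈ l2, 0 ≤ pyGetDigit s idx ∧ pyGetDigit s idx ≤ 255) :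
    bucketize l2 idx = (List.range 256).map
      (fun (e : Nat) => l2.filter (fun s => decide (pyGetDigit s idx = (e : Int)))) := by
  rw [bucketize_eq_foldl]
  apply List.ext_getElem
  · rw [bucketize_fold_len, List.length_replicate, List.length_map, List.length_range]
  · intro n h1 h2
    have hn : n < 256 := by simpa using h2
    have h3 := PySem.List.pyGetD_eq_getElem
      (l2.foldl (fun bs s => bs.set (pyGetDigit s idx).toNat
        (PySem.List.pyGetD bs (pyGetDigit s idx) [] ++ [s])) (List.replicate 256 []))
      (i := (n : Int)) [] (Int.natCast_nonneg n)
      (by rw [bucketize_fold_len, List.length_replicate]; exact_mod_cast hn)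
    simp only [Int.toNat_natCast] at h3
    rw [← h3, bucketize_fold_get l2 idx hg _ List.length_replicate n hn]
    have h4 := PySem.List.pyGetD_eq_getElem (List.replicate 256 ([] : List String))
      (i := (n : Int)) [] (Int.natCast_nonneg n)
      (by rw [List.length_replicate]; exact_mod_cast hn)
    simp only [Int.toNat_natCast] at h4
    rw [h4, List.getElem_replicate, List.nil_append, List.getElem_map, List.getElem_range]

-- the final collecting loop of A is a flatten
lemma join_eq_flatten (bs2 : List (List String)) (h : bs2.length = 256) :
    (PySem.List.pyRange 0 256).foldl (fun acc i => acc ++ PySem.List.pyGetD bs2 i []) []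
      = bs2.flatten := by
  have h1 : (256 : Int) = PySem.List.len bs2 := by
    rw [show PySem.List.len bs2 = (bs2.length : Int) from rfl, h]
    norm_num
  rw [h1, PySem.List.foldl_append_eq_flatMap (fun i => PySem.List.pyGetD bs2 i []) _ [],
    List.flatMap_def, PySem.List.map_pyGetD_pyRange_zero, List.nil_append]


-- ---------- assembling the main equivalence ----------
lemma pvDigit_bounds {s : String} (hs : pvDomStr s = true) (p : Int) :
    0 ≤ pyGetDigit s p ∧ pyGetDigit s p ≤ 255 :=
  ⟨pvDigit_nonneg s p, pvDigit_le_255 hs p⟩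

lemma A_stop (l : List String) (i : Int) (hge : maxLenI l ≤ i) :
    sorting_variable_length_strings_internal l i = l := by
  unfold sorting_variable_length_strings_internal
  dsimp only
  by_cases h0 : PySem.List.len l = (0 : Int)
  · rw [if_pos h0]
  · rw [if_neg h0, if_pos (by exact hge)]

lemma sorted_stop (l : List String) (i : Int) (hge : maxLenI l ≤ i) :
    PySem.List.sorted l (fun s => keyK i (maxLenI l) s) = l := by
  apply sorted_of_forall_not_lt
  intro a _ b _
  rw [keyK_nil hge, keyK_nil hge]
  simp [List.not_lt_nil]

lemma main_lemma : ∀ (N : Nat) (l : List String) (i : Int),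
    (maxLenI l - i).toNat ≤ N →
    (∀ s ∈ l, pvDomStr s = true) →
    sorting_variable_length_strings_internal l i
      = PySem.List.sorted l (fun s => keyK i (maxLenI l) s) := by
  intro N
  induction N with
  | zero =>
    intro l i hN hdom
    have hge : maxLenI l ≤ i := by omega
    rw [A_stop l i hge, sorted_stop l i hge]
  | succ N ih =>
    intro l i hN hdom
    by_cases hnil : l = []
    · subst hnil
      have h1 : sorting_variable_length_strings_internal [] i = [] := by
        unfold sorting_variable_length_strings_internal
        dsimp only
        rw [if_pos (show PySem.List.len ([] : List String) = 0 from rfl)]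
      rw [h1]
      rfl
    by_cases hstop : maxLenI l ≤ i
    · rw [A_stop l i hstop, sorted_stop l i hstop]
    have hlt : i < maxLenI l := by omega
    have hg : ∀ s ∈ l, 0 ≤ pyGetDigit s i ∧ pyGetDigit s i ≤ 255 :=
      fun s hs => pvDigit_bounds (hdom s hs) i
    unfold sorting_variable_length_strings_internal
    dsimp only
    rw [if_neg (show ¬ (PySem.List.len l = (0 : Int)) by
        simp [List.length_eq_zero_iff, hnil]),
      if_neg (show ¬ (i ≥ maxLenI l) by omega)]
    rw [List.attach_map_val
      (l := bucketize (countingSort l i) i)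
      (f := fun b => sorting_variable_length_strings_internal b (i + 1))]
    rw [cs_sorted l i hg]
    have hmemsort : ∀ s ∈ PySem.List.sorted l (fun s => pyGetDigit s i), s ∈ l :=
      fun s hs => (PySem.List.mem_sorted _ _ _ _).1 hs
    rw [bucketize_eq_map _ i (fun s hs => hg s (hmemsort s hs)), List.map_map]
    rw [join_eq_flatten _ (by rw [List.length_map, List.length_range])]
    have hfix : ∀ e ∈ List.range 256,
        ((fun b => sorting_variable_length_strings_internal b (i + 1)) ∘
          fun (e : Nat) => (PySem.List.sorted l (fun s => pyGetDigit s i)).filter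
            (fun s => decide (pyGetDigit s i = (e : Int)))) e
          = PySem.List.sorted (l.filter (fun s => decide (pyGetDigit s i = (e : Int))))
              (fun s => keyK (i + 1) (maxLenI l) s) := by
      intro e _
      simp only [Function.comp]
      rw [filter_sorted_class l (fun s => pyGetDigit s i) (e : Int)]
      have hsub : ∀ t ∈ l.filter (fun s => decide (pyGetDigit s i = (e : Int))), t ∈ l :=
        fun t ht => List.mem_of_mem_filter ht
      have hmax : maxLenI (l.filter (fun s => decide (pyGetDigit s i = (e : Int)))) ≤ maxLenI l :=
        maxLenI_le (fun t ht => len_le_maxLenI (hsub t ht)) (maxLenI_nonneg l)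
      rw [ih _ (i + 1) (by omega) (fun t ht => hdom t (hsub t ht))]
      apply sorted_key_congr
      intro a ha b hb
      apply decide_eq_decide.2
      exact (keyK_lt_iff_of_le
        (m := maxLenI (l.filter (fun s => decide (pyGetDigit s i = (e : Int)))))
        (len_le_maxLenI ha) (len_le_maxLenI hb) hmax).symm
    rw [List.map_congr_left hfix,
      sorted_split l (fun s => pyGetDigit s i) (fun s => keyK (i + 1) (maxLenI l) s) hg]
    have hk : (fun s => pyGetDigit s i :: keyK (i + 1) (maxLenI l) s)
        = (fun s => keyK i (maxLenI l) s) := funext fun s => (keyK_cons hlt s).symm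
    rw [hk]

-- ===== VERDICT (by name: the statement is the Claim_ definition above) =====
theorem sorting_variable_length_strings_internal_spec : Claim_equal_sorting_variable_length_strings_internal := by
  intro l i hdom _hpre
  unfold Spec_sorting_variable_length_strings_internal
  by_cases hnil : l = []
  · subst hnil
    have h1 : sorting_variable_length_strings_internal [] i = [] := by
      unfold sorting_variable_length_strings_internal
      dsimp only
      rw [if_pos (show PySem.List.len ([] : List String) = 0 from rfl)]
    have h2 : sorting_variable_length_strings_internal_alt [] i = [] := by
      unfold sorting_variable_length_strings_internal_alt
      rw [if_pos rfl]
    rw [h1, h2]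
  · rw [alt_eq_sorted l i hnil]
    unfold Dom_sorting_variable_length_strings_internal at hdom
    simp only [Bool.and_eq_true, List.all_eq_true] at hdom
    exact main_lemma (maxLenI l - i).toNat l i (le_refl _) (fun s hs => hdom.1 s hs)
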